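-- pv_equiv track=rewrite | github.com/xiaoshan-lin/RLwTWTL | src/plot_route.py | package_path_gen
-- ===== SOURCE A (Python) =====
-- def package_path_gen(path, p_loc, d_loc):
--     # make a path for the package picture
--     pack_path = [p_loc]
--     pack_state = 0
--     for p1,p2 in zip(path[:-1], path[1:]):
--         if pack_state == 0:
--             pack_path.append(p_loc)
--             if p1 == p2 == p_loc:
--                 pack_state = 1
--         elif pack_state == 1:
--             pack_path.append(p2)
--             if p1 == p2 == d_loc:
--                 pack_state = 2
--         elif pack_state == 2:
--             pack_path.append(d_loc)
--     return pack_path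
-- ===== SOURCE B (Python) =====
-- def package_path_gen(path, p_loc, d_loc):
--     # boundary-finding + slice construction instead of an incremental state machine
--     nxt = path[1:]
--     pairs = list(zip(path, nxt))
--     m = len(pairs)
--     k0 = next((i for i, (a, b) in enumerate(pairs) if a == b == p_loc), None)
--     if k0 is None:
--         return [p_loc] * (m + 1)
--     k1 = next((i for i, (a, b) in enumerate(pairs[k0 + 1:], start=k0 + 1)
--                if a == b == d_loc), None)
--     if k1 is None:
--         return [p_loc] * (k0 + 2) + nxt[k0 + 1:]
--     return [p_loc] * (k0 + 2) + nxt[k0 + 1:k1 + 1] + [d_loc] * (m - 1 - k1)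
-- ===== Notes on version B (the rewrite author's own statement) =====
-- stated objective: alternative
-- what changed: Replaces A's per-step state machine (state variable mutated while appending) with boundary finding: locate the first (p_loc,p_loc) pair and the first later (d_loc,d_loc) pair, then assemble the result directly from replicate/slice segments.
import Mathlib
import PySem

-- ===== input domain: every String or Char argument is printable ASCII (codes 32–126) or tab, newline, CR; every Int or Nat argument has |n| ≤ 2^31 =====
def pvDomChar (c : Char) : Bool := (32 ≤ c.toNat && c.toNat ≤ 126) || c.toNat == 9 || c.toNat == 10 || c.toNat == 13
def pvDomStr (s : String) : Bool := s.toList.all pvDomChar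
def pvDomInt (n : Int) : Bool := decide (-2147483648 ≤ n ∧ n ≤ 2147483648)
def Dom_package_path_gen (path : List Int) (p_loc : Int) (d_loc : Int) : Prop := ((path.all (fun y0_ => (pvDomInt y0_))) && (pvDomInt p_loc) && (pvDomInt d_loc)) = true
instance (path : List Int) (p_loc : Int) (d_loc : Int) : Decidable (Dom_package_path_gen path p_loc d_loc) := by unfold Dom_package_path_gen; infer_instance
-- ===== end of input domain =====

-- B replaces A's incremental state machine by finding the two state boundaries first
-- and assembling the result from replicate/slice segments (objective: alternative decomposition).

-- ===== PORT A =====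
-- the for-loop over zip(path[:-1], path[1:]) with pack_state, appending one element per pair
def pvGoA (pairs : List (Int × Int)) (st : Nat) (p_loc : Int) (d_loc : Int) : List Int :=
  match pairs with
  | [] => []
  | (p1, p2) :: rest =>
    if st = 0 then
      p_loc :: pvGoA rest (if p1 = p2 ∧ p2 = p_loc then 1 else 0) p_loc d_loc
    else if st = 1 then
      p2 :: pvGoA rest (if p1 = p2 ∧ p2 = d_loc then 2 else 1) p_loc d_loc
    else
      d_loc :: pvGoA rest st p_loc d_loc

def package_path_gen (path : List Int) (p_loc : Int) (d_loc : Int) : List Int :=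
  p_loc :: pvGoA (path.dropLast.zip path.tail) 0 p_loc d_loc

-- ===== PORT B =====
def package_path_gen_alt (path : List Int) (p_loc : Int) (d_loc : Int) : List Int :=
  let nxt := path.tail
  let pairs := path.zip nxt
  let m := pairs.length
  match pairs.findIdx? (fun pr => pr.1 == p_loc && pr.2 == p_loc) with
  | none => List.replicate (m + 1) p_loc
  | some k0 =>
    match (pairs.drop (k0 + 1)).findIdx? (fun pr => pr.1 == d_loc && pr.2 == d_loc) with
    | none => List.replicate (k0 + 2) p_loc ++ nxt.drop (k0 + 1)
    | some j =>
      let k1 := k0 + 1 + j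
      List.replicate (k0 + 2) p_loc ++ (nxt.drop (k0 + 1)).take (k1 - k0) ++
        List.replicate (m - 1 - k1) d_loc

-- ===== PRECONDITION & SPEC =====
def Spec_package_path_gen (path : List Int) (p_loc : Int) (d_loc : Int) (out : List Int) : Prop := out = package_path_gen_alt path p_loc d_loc
instance (path : List Int) (p_loc : Int) (d_loc : Int) (out : List Int) : Decidable (Spec_package_path_gen path p_loc d_loc out) := by unfold Spec_package_path_gen; infer_instance

-- ===== CLAIM (what is proved, stated in full; the proofs are below) =====
def Claim_equal_package_path_gen : Prop := ∀ (path : List Int) (p_loc : Int) (d_loc : Int), Dom_package_path_gen path p_loc d_loc → Spec_package_path_gen path p_loc d_loc (package_path_gen path p_loc d_loc)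

-- ===== LEMMAS AND PROOFS =====

-- state 2 just emits d_loc forever
theorem pvGoA_two (pairs : List (Int × Int)) (p d : Int) :
    pvGoA pairs 2 p d = List.replicate pairs.length d := by
  induction pairs with
  | nil => simp [pvGoA]
  | cons pr rest ih => cases pr; simp [pvGoA, ih, List.replicate_succ]

-- state 1: emits successors until the first (d,d) pair, then d_loc forever
theorem pvGoA_one (pairs : List (Int × Int)) (p d : Int) :
    pvGoA pairs 1 p d =
      match pairs.findIdx? (fun pr => pr.1 == d && pr.2 == d) with
      | none => pairs.map Prod.snd
      | some j => (pairs.take (j + 1)).map Prod.snd ++ List.replicate (pairs.length - (j + 1)) d := by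
  induction pairs with
  | nil => simp [pvGoA]
  | cons pr rest ih =>
    obtain ⟨p1, p2⟩ := pr
    by_cases h : p1 = p2 ∧ p2 = d
    · obtain ⟨h1, h2⟩ := h
      subst h2; subst h1
      simp [pvGoA, List.findIdx?_cons, pvGoA_two]
    · have hb : (p1 == d && p2 == d) = false := by
        by_cases h1 : p1 = d
        · by_cases h2 : p2 = d
          · exact absurd ⟨by rw [h1, h2], h2⟩ h
          · simp [h2]
        · simp [h1]
      simp only [pvGoA, if_neg h, List.findIdx?_cons, hb, if_pos rfl, reduceIte, ih]
      cases hfi : rest.findIdx? (fun pr => pr.1 == d && pr.2 == d) with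
      | none => simp [hfi]
      | some j => simp [hfi, List.replicate_succ]

-- state 0: emits p_loc until the first (p,p) pair, then hands over to state 1
theorem pvGoA_zero (pairs : List (Int × Int)) (p d : Int) :
    p :: pvGoA pairs 0 p d =
      match pairs.findIdx? (fun pr => pr.1 == p && pr.2 == p) with
      | none => List.replicate (pairs.length + 1) p
      | some k0 => List.replicate (k0 + 2) p ++ pvGoA (pairs.drop (k0 + 1)) 1 p d := by
  induction pairs with
  | nil => simp [pvGoA]
  | cons pr rest ih =>
    obtain ⟨p1, p2⟩ := pr
    by_cases h : p1 = p2 ∧ p2 = p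
    · obtain ⟨h1, h2⟩ := h
      subst h2; subst h1
      simp [pvGoA, List.findIdx?_cons, List.replicate_succ]
    · have hb : (p1 == p && p2 == p) = false := by
        by_cases h1 : p1 = p
        · by_cases h2 : p2 = p
          · exact absurd ⟨by rw [h1, h2], h2⟩ h
          · simp [h2]
        · simp [h1]
      simp only [pvGoA, if_neg h, if_pos rfl, List.findIdx?_cons, hb, reduceIte]
      cases hfi : rest.findIdx? (fun pr => pr.1 == p && pr.2 == p) with
      | none =>
        simp only [hfi] at ih
        simp only [hfi, Option.map_none, List.length_cons]
        rw [List.replicate_succ, ← ih]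
        simp
      | some k =>
        simp only [hfi] at ih
        simp only [hfi, Option.map_some]
        have : p :: (p :: pvGoA rest 0 p d) =
            p :: (List.replicate (k + 2) p ++ pvGoA (rest.drop (k + 1)) 1 p d) := by
          rw [← ih]
        simpa [List.replicate_succ] using this

-- pairs in A and B coincide, and the successor list is the snd projection of pairs
theorem pvPairs_eq (path : List Int) :
    path.dropLast.zip path.tail = path.zip path.tail := by
  cases path with
  | nil => simp
  | cons a rest =>
    simp only [List.tail_cons]
    induction rest generalizing a with
    | nil => simp
    | cons b rest ih => simp [ih b]

theorem pvSnd_pairs (path : List Int) :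
    (path.zip path.tail).map Prod.snd = path.tail := by
  cases path with
  | nil => simp
  | cons a rest =>
    simp only [List.tail_cons]
    induction rest generalizing a with
    | nil => simp
    | cons b rest ih => simp [ih b]

-- ===== VERDICT (by name: the statement is the Claim_ definition above) =====
theorem package_path_gen_spec : Claim_equal_package_path_gen := by
  intro path p d _
  show package_path_gen path p d = package_path_gen_alt path p d
  unfold package_path_gen package_path_gen_alt
  rw [pvPairs_eq, pvGoA_zero]
  have hsnd : (path.zip path.tail).map Prod.snd = path.tail := pvSnd_pairs path
  cases hfi : (path.zip path.tail).findIdx? (fun pr => pr.1 == p && pr.2 == p) with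
  | none => simp [hfi]
  | some k0 =>
    simp only [hfi]
    rw [pvGoA_one]
    have hdrop : ((path.zip path.tail).drop (k0 + 1)).map Prod.snd = path.tail.drop (k0 + 1) := by
      simp only [List.map_drop, hsnd]
    cases hfj : ((path.zip path.tail).drop (k0 + 1)).findIdx? (fun pr => pr.1 == d && pr.2 == d) with
    | none => simp [hfj, hdrop]
    | some j =>
      simp only [hfj]
      rw [← hdrop, ← List.map_take]
      have hjlt : j < ((path.zip path.tail).drop (k0 + 1)).length :=
        (List.findIdx?_eq_some_iff_findIdx_eq.mp hfj).1
      have hlen : ((path.zip path.tail).drop (k0 + 1)).length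
          = (path.zip path.tail).length - (k0 + 1) := by simp
      have h1 : k0 + 1 + j - k0 = j + 1 := by omega
      have h2 : ((path.zip path.tail).drop (k0 + 1)).length - (j + 1)
          = (path.zip path.tail).length - 1 - (k0 + 1 + j) := by omega
      rw [h1, h2, List.append_assoc]
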